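-- pv_equiv track=rewrite | github.com/harrisonized/interview-practice | functions/iterators.py | idx_for_diag_se_from_bl
-- ===== SOURCE A (Python) =====
-- def idx_for_diag_se_from_bl(num_rows=2, num_cols=3):
--     """Traverse southeast diagonals from bottom left
--     This is the second most important variant
--
--     Eg.
--
--       0    1    2
--        \\   \\   \\
--     -1 ['A', 'B', 'C']
--        \\   \\   \\
--        ['D', 'E', 'F']
--
--     Returns row and col indices for: D, A, E, B, F, C
--
--     Align two strings where col -> str1, row -> str2
--     col:  abc    abc    abc
--           |   => ||  =>   |
--     row: ab      ab       ab
--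
--     Fastest but reduces readability
--     """
--
--     if num_rows <= num_cols:
--
--         # lower left triangle
--         for row in range(num_rows-1, 0, -1):
--             col = 0
--             while row < num_rows:
--                 yield row, col
--                 row += 1
--                 col += 1
--
--         # middle diagonals
--         for col in range(0, num_cols-num_rows+1):
--             row = 0
--             while row < num_rows:
--                 yield row, col
--                 row += 1
--                 col += 1
--
--         # upper right triangle
--         for col in range(num_cols-num_rows+1, num_cols):
--             row = 0
--             while col < num_cols:
--                 yield row, col
--                 row += 1
--                 col += 1
--
--     else:
--
--         # lower left triangle
--         for row in range(num_rows-1, num_rows-num_cols, -1):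
--             col = 0
--             while row < num_rows:
--                 yield row, col
--                 row += 1
--                 col += 1
--
--         # middle diagonals
--         for row in range(num_rows-num_cols, -1, -1):
--             col = 0
--             while col < num_cols:
--                 yield row, col
--                 row += 1
--                 col += 1
--
--         # upper right triangle
--         for col in range(1, num_cols):
--             row = 0
--             while col < num_cols:
--                 yield row, col
--                 row += 1
--                 col += 1
-- ===== SOURCE B (Python) =====
-- def idx_for_diag_se_from_bl(num_rows=2, num_cols=3):
--     """Traverse southeast diagonals from bottom left: one loop over the
--     diagonal index d = row - col, from num_rows-1 down to -(num_cols-1)."""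
--     for d in range(num_rows - 1, -num_cols, -1):
--         row = max(0, d)
--         col = row - d
--         while row < num_rows and col < num_cols:
--             yield row, col
--             row += 1
--             col += 1
-- ===== Notes on version B (the rewrite author's own statement) =====
-- stated objective: simpler
-- what changed: Replaces A's two-branch, three-triangle structure (six loops) with a single loop over the diagonal index d = row - col from num_rows-1 down to -(num_cols-1), walking each diagonal with one uniform while loop.
import Mathlib
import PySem

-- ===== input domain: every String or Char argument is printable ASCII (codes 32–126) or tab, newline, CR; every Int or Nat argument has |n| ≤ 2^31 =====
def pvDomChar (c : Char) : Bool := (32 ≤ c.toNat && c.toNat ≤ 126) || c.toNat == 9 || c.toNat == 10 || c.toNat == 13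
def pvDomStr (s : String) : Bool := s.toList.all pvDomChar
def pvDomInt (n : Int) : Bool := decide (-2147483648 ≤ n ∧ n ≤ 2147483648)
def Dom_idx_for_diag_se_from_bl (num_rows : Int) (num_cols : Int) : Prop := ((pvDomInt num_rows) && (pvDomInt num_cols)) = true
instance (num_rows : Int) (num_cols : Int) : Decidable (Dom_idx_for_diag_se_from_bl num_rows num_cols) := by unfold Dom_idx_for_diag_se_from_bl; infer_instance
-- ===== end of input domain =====

-- B replaces A's two-branch / three-triangle structure with ONE loop over the
-- diagonal index d = row - col (simpler decomposition; same exact output).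

-- ===== PORT A =====
-- while row < num_rows: yield (row, col); row += 1; col += 1
def pvWhileRow (num_rows row col : Int) : List (Int × Int) :=
  if row < num_rows then (row, col) :: pvWhileRow num_rows (row + 1) (col + 1) else []
termination_by (num_rows - row).toNat
decreasing_by omega

-- while col < num_cols: yield (row, col); row += 1; col += 1
def pvWhileCol (num_cols row col : Int) : List (Int × Int) :=
  if col < num_cols then (row, col) :: pvWhileCol num_cols (row + 1) (col + 1) else []
termination_by (num_cols - col).toNat
decreasing_by omega

def idx_for_diag_se_from_bl (num_rows : Int) (num_cols : Int) : List (Int × Int) :=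
  if num_rows ≤ num_cols then
    let s1 := (PySem.List.pyRange (num_rows - 1) 0 (-1)).foldl
      (fun acc row => acc ++ pvWhileRow num_rows row 0) []
    let s2 := (PySem.List.pyRange 0 (num_cols - num_rows + 1) 1).foldl
      (fun acc col => acc ++ pvWhileRow num_rows 0 col) s1
    (PySem.List.pyRange (num_cols - num_rows + 1) num_cols 1).foldl
      (fun acc col => acc ++ pvWhileCol num_cols 0 col) s2
  else
    let s1 := (PySem.List.pyRange (num_rows - 1) (num_rows - num_cols) (-1)).foldl
      (fun acc row => acc ++ pvWhileRow num_rows row 0) []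
    let s2 := (PySem.List.pyRange (num_rows - num_cols) (-1) (-1)).foldl
      (fun acc row => acc ++ pvWhileCol num_cols row 0) s1
    (PySem.List.pyRange 1 num_cols 1).foldl
      (fun acc col => acc ++ pvWhileCol num_cols 0 col) s2

-- ===== PORT B =====
-- while row < num_rows and col < num_cols: yield (row, col); row += 1; col += 1
def pvWhileBoth (num_rows num_cols row col : Int) : List (Int × Int) :=
  if row < num_rows ∧ col < num_cols then
    (row, col) :: pvWhileBoth num_rows num_cols (row + 1) (col + 1)
  else []
termination_by (num_rows - row).toNat
decreasing_by omega

def idx_for_diag_se_from_bl_alt (num_rows : Int) (num_cols : Int) : List (Int × Int) :=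
  (PySem.List.pyRange (num_rows - 1) (-num_cols) (-1)).foldl
    (fun acc d => acc ++ pvWhileBoth num_rows num_cols (max 0 d) (max 0 d - d)) []

-- ===== PRECONDITION & SPEC =====
def Spec_idx_for_diag_se_from_bl (num_rows : Int) (num_cols : Int) (out : List (Int × Int)) : Prop := out = idx_for_diag_se_from_bl_alt num_rows num_cols
instance (num_rows : Int) (num_cols : Int) (out : List (Int × Int)) : Decidable (Spec_idx_for_diag_se_from_bl num_rows num_cols out) := by unfold Spec_idx_for_diag_se_from_bl; infer_instance

-- ===== CLAIM (what is proved, stated in full; the proofs are below) =====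
def Claim_equal_idx_for_diag_se_from_bl : Prop := ∀ (num_rows : Int) (num_cols : Int), Dom_idx_for_diag_se_from_bl num_rows num_cols → Spec_idx_for_diag_se_from_bl num_rows num_cols (idx_for_diag_se_from_bl num_rows num_cols)

-- ===== LEMMAS AND PROOFS =====

-- the SE diagonal of a given length starting at (row, col)
def pvDiag (len : Nat) (row col : Int) : List (Int × Int) :=
  (List.range len).map (fun (k : Nat) => (row + (k : Int), col + (k : Int)))

theorem pvDiag_succ (m : Nat) (r c : Int) :
    pvDiag (m + 1) r c = (r, c) :: pvDiag m (r + 1) (c + 1) := by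
  unfold pvDiag
  rw [List.range_succ_eq_map, List.map_cons, List.map_map]
  refine congrArg₂ List.cons (by simp) ?_
  apply List.map_congr_left; intro k _
  simp only [Function.comp_apply, Prod.mk.injEq]
  constructor <;> · push_cast; ring

theorem pvWhileRow_eq (nr r c : Int) :
    pvWhileRow nr r c = pvDiag (nr - r).toNat r c := by
  generalize hk : (nr - r).toNat = k
  induction k generalizing r c with
  | zero => rw [pvWhileRow]; rw [if_neg (by omega)]; simp [pvDiag]
  | succ m ih =>
      rw [pvWhileRow, if_pos (by omega), pvDiag_succ, ih (r + 1) (c + 1) (by omega)]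

theorem pvWhileCol_eq (nc r c : Int) :
    pvWhileCol nc r c = pvDiag (nc - c).toNat r c := by
  generalize hk : (nc - c).toNat = k
  induction k generalizing r c with
  | zero => rw [pvWhileCol]; rw [if_neg (by omega)]; simp [pvDiag]
  | succ m ih =>
      rw [pvWhileCol, if_pos (by omega), pvDiag_succ, ih (r + 1) (c + 1) (by omega)]

theorem pvWhileBoth_eq (nr nc r c : Int) :
    pvWhileBoth nr nc r c = pvDiag (min (nr - r) (nc - c)).toNat r c := by
  generalize hk : (min (nr - r) (nc - c)).toNat = k
  induction k generalizing r c with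
  | zero => rw [pvWhileBoth]; rw [if_neg (by omega)]; simp [pvDiag]
  | succ m ih =>
      rw [pvWhileBoth, if_pos (by omega), pvDiag_succ, ih (r + 1) (c + 1) (by omega)]

theorem pvFlatMap_congr_mem {α β : Type} {l : List α} {f g : α → List β}
    (h : ∀ x ∈ l, f x = g x) : l.flatMap f = l.flatMap g := by
  induction l with
  | nil => rfl
  | cons a t ih =>
      simp only [List.flatMap_cons]
      rw [h a (by simp), ih (fun x hx => h x (by simp [hx]))]

theorem pvFlatMap_nil {α β : Type} {l : List α} {f : α → List β}
    (h : ∀ x ∈ l, f x = []) : l.flatMap f = [] := by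
  rw [pvFlatMap_congr_mem h]; simp

theorem pvRange_neg_split (a m b : Int) (h1 : b ≤ m) (h2 : m ≤ a) :
    PySem.List.pyRange a b (-1)
      = PySem.List.pyRange a m (-1) ++ PySem.List.pyRange m b (-1) := by
  rw [PySem.List.pyRange_neg_one_eq_reverse, PySem.List.pyRange_neg_one_eq_reverse,
      PySem.List.pyRange_neg_one_eq_reverse,
      PySem.List.pyRange_one_append (b + 1) (m + 1) (a + 1) (by omega) (by omega),
      List.reverse_append]

theorem pvRange_neg_eq_map_neg (a b : Int) :
    PySem.List.pyRange a b (-1)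
      = (PySem.List.pyRange (-a) (-b) 1).map (fun x => -x) := by
  rw [PySem.List.pyRange_neg_one, PySem.List.pyRange_one, List.map_map]
  have h : -b - -a = a - b := by ring
  rw [h]
  apply List.map_congr_left; intro k _
  simp only [Function.comp_apply]; ring

theorem pvFlatMap_map {α β γ : Type} (l : List α) (f : α → β) (g : β → List γ) :
    (l.map f).flatMap g = l.flatMap (fun x => g (f x)) := by
  induction l with
  | nil => rfl
  | cons a t ih => simp only [List.map_cons, List.flatMap_cons, ih]

theorem idx_main (nr nc : Int) :
    idx_for_diag_se_from_bl nr nc = idx_for_diag_se_from_bl_alt nr nc := by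
  unfold idx_for_diag_se_from_bl idx_for_diag_se_from_bl_alt
  simp only [PySem.List.foldl_append_eq_flatMap, List.nil_append]
  split
  · next h =>
    -- num_rows ≤ num_cols
    by_cases hr : nr ≤ 0
    · -- degenerate: everything empty
      rw [PySem.List.pyRange_neg_one_eq_nil (by omega)]
      rw [PySem.List.pyRange_one_eq_nil (a := nc - nr + 1) (b := nc) (by omega)]
      rw [pvFlatMap_nil (f := fun col => pvWhileRow nr 0 col) (fun x _ => by
            show pvWhileRow nr 0 x = []
            rw [pvWhileRow_eq]
            have h0 : (nr - 0).toNat = 0 := by omega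
            rw [h0]; simp [pvDiag])]
      rw [pvFlatMap_nil
            (f := fun d => pvWhileBoth nr nc (max 0 d) (max 0 d - d)) (fun d _ => by
            show pvWhileBoth nr nc (max 0 d) (max 0 d - d) = []
            rw [pvWhileBoth_eq]
            have h0 : (min (nr - max 0 d) (nc - (max 0 d - d))).toNat = 0 := by omega
            rw [h0]; simp [pvDiag])]
      simp
    · rw [pvRange_neg_split (nr - 1) 0 (-nc) (by omega) (by omega),
          pvRange_neg_split 0 (nr - nc - 1) (-nc) (by omega) (by omega)]
      rw [List.flatMap_append, List.flatMap_append]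
      have e1 : (PySem.List.pyRange (nr - 1) 0 (-1)).flatMap (fun row => pvWhileRow nr row 0)
          = (PySem.List.pyRange (nr - 1) 0 (-1)).flatMap
              (fun d => pvWhileBoth nr nc (max 0 d) (max 0 d - d)) := by
        apply pvFlatMap_congr_mem; intro x hx
        rw [PySem.List.mem_pyRange_neg_one] at hx
        show pvWhileRow nr x 0 = pvWhileBoth nr nc (max 0 x) (max 0 x - x)
        rw [pvWhileRow_eq, pvWhileBoth_eq, max_eq_right (by omega : (0:Int) ≤ x), sub_self]
        have hl : (min (nr - x) (nc - 0)).toNat = (nr - x).toNat := by omega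
        rw [hl]
      have e2 : (PySem.List.pyRange 0 (nc - nr + 1) 1).flatMap (fun col => pvWhileRow nr 0 col)
          = (PySem.List.pyRange 0 (nr - nc - 1) (-1)).flatMap
              (fun d => pvWhileBoth nr nc (max 0 d) (max 0 d - d)) := by
        rw [pvRange_neg_eq_map_neg, neg_zero]
        rw [(by ring : -(nr - nc - 1) = nc - nr + 1), pvFlatMap_map]
        apply pvFlatMap_congr_mem; intro x hx
        rw [PySem.List.mem_pyRange_one] at hx
        show pvWhileRow nr 0 x = pvWhileBoth nr nc (max 0 (-x)) (max 0 (-x) - -x)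
        rw [pvWhileRow_eq, pvWhileBoth_eq, max_eq_left (by omega : -x ≤ (0:Int))]
        rw [(by ring : (0:Int) - -x = x)]
        have hl : (min (nr - 0) (nc - x)).toNat = (nr - 0).toNat := by omega
        rw [hl]
      have e3 : (PySem.List.pyRange (nc - nr + 1) nc 1).flatMap (fun col => pvWhileCol nc 0 col)
          = (PySem.List.pyRange (nr - nc - 1) (-nc) (-1)).flatMap
              (fun d => pvWhileBoth nr nc (max 0 d) (max 0 d - d)) := by
        rw [pvRange_neg_eq_map_neg, neg_neg]
        rw [(by ring : -(nr - nc - 1) = nc - nr + 1), pvFlatMap_map]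
        apply pvFlatMap_congr_mem; intro x hx
        rw [PySem.List.mem_pyRange_one] at hx
        show pvWhileCol nc 0 x = pvWhileBoth nr nc (max 0 (-x)) (max 0 (-x) - -x)
        rw [pvWhileCol_eq, pvWhileBoth_eq, max_eq_left (by omega : -x ≤ (0:Int))]
        rw [(by ring : (0:Int) - -x = x)]
        have hl : (min (nr - 0) (nc - x)).toNat = (nc - x).toNat := by omega
        rw [hl]
      rw [e1, e2, e3, List.append_assoc]
  · next h =>
    -- num_cols < num_rows
    by_cases hc : nc ≤ 0
    · rw [PySem.List.pyRange_neg_one_eq_nil (a := nr - 1) (b := nr - nc) (by omega)]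
      rw [PySem.List.pyRange_one_eq_nil (a := 1) (b := nc) (by omega)]
      rw [pvFlatMap_nil (f := fun row => pvWhileCol nc row 0) (fun x _ => by
            show pvWhileCol nc x 0 = []
            rw [pvWhileCol_eq]
            have h0 : (nc - 0).toNat = 0 := by omega
            rw [h0]; simp [pvDiag])]
      rw [pvFlatMap_nil
            (f := fun d => pvWhileBoth nr nc (max 0 d) (max 0 d - d)) (fun d _ => by
            show pvWhileBoth nr nc (max 0 d) (max 0 d - d) = []
            rw [pvWhileBoth_eq]
            have h0 : (min (nr - max 0 d) (nc - (max 0 d - d))).toNat = 0 := by omega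
            rw [h0]; simp [pvDiag])]
      simp
    · rw [pvRange_neg_split (nr - 1) (nr - nc) (-nc) (by omega) (by omega),
          pvRange_neg_split (nr - nc) (-1) (-nc) (by omega) (by omega)]
      rw [List.flatMap_append, List.flatMap_append]
      have e1 : (PySem.List.pyRange (nr - 1) (nr - nc) (-1)).flatMap (fun row => pvWhileRow nr row 0)
          = (PySem.List.pyRange (nr - 1) (nr - nc) (-1)).flatMap
              (fun d => pvWhileBoth nr nc (max 0 d) (max 0 d - d)) := by
        apply pvFlatMap_congr_mem; intro x hx
        rw [PySem.List.mem_pyRange_neg_one] at hx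
        show pvWhileRow nr x 0 = pvWhileBoth nr nc (max 0 x) (max 0 x - x)
        rw [pvWhileRow_eq, pvWhileBoth_eq, max_eq_right (by omega : (0:Int) ≤ x), sub_self]
        have hl : (min (nr - x) (nc - 0)).toNat = (nr - x).toNat := by omega
        rw [hl]
      have e2 : (PySem.List.pyRange (nr - nc) (-1) (-1)).flatMap (fun row => pvWhileCol nc row 0)
          = (PySem.List.pyRange (nr - nc) (-1) (-1)).flatMap
              (fun d => pvWhileBoth nr nc (max 0 d) (max 0 d - d)) := by
        apply pvFlatMap_congr_mem; intro x hx
        rw [PySem.List.mem_pyRange_neg_one] at hx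
        show pvWhileCol nc x 0 = pvWhileBoth nr nc (max 0 x) (max 0 x - x)
        rw [pvWhileCol_eq, pvWhileBoth_eq, max_eq_right (by omega : (0:Int) ≤ x), sub_self]
        have hl : (min (nr - x) (nc - 0)).toNat = (nc - 0).toNat := by omega
        rw [hl]
      have e3 : (PySem.List.pyRange 1 nc 1).flatMap (fun col => pvWhileCol nc 0 col)
          = (PySem.List.pyRange (-1) (-nc) (-1)).flatMap
              (fun d => pvWhileBoth nr nc (max 0 d) (max 0 d - d)) := by
        rw [pvRange_neg_eq_map_neg, neg_neg, neg_neg, pvFlatMap_map]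
        apply pvFlatMap_congr_mem; intro x hx
        rw [PySem.List.mem_pyRange_one] at hx
        show pvWhileCol nc 0 x = pvWhileBoth nr nc (max 0 (-x)) (max 0 (-x) - -x)
        rw [pvWhileCol_eq, pvWhileBoth_eq, max_eq_left (by omega : -x ≤ (0:Int))]
        rw [(by ring : (0:Int) - -x = x)]
        have hl : (min (nr - 0) (nc - x)).toNat = (nc - x).toNat := by omega
        rw [hl]
      rw [e1, e2, e3, List.append_assoc]

-- ===== VERDICT (by name: the statement is the Claim_ definition above) =====
theorem idx_for_diag_se_from_bl_spec : Claim_equal_idx_for_diag_se_from_bl := by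
  intro nr nc _
  unfold Spec_idx_for_diag_se_from_bl
  exact idx_main nr nc
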